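-- pv_equiv track=rewrite | github.com/surreal70/Handbook-Generator | helpers/cleanup_duplicate_headers.py | clean_duplicate_headers
-- ===== SOURCE A (Python) =====
-- def clean_duplicate_headers(content: str) -> str:
--     """Remove duplicate headers, keeping only the first one."""
--     lines = content.split('\n')
--
--     # Find the title
--     title_idx = -1
--     for i, line in enumerate(lines):
--         if line.startswith('# '):
--             title_idx = i
--             break
--
--     if title_idx < 0:
--         return content
--
--     # Find all header blocks (lines starting with **)
--     header_blocks = []
--     i = title_idx + 1
--     while i < len(lines):
--         if lines[i].strip().startswith('**'):
--             # Found start of a header block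
--             block_start = i
--             block_end = i
--             while block_end < len(lines) and (lines[block_end].strip().startswith('**') or lines[block_end].strip() == ''):
--                 block_end += 1
--             header_blocks.append((block_start, block_end))
--             i = block_end
--         elif lines[i].strip() == '---':
--             i += 1
--         elif lines[i].strip().startswith('<!--') or lines[i].strip().startswith('##'):
--             # Reached content, stop looking
--             break
--         else:
--             i += 1
--
--     # If we found multiple header blocks, keep only the first
--     if len(header_blocks) > 1:
--         # Remove all but the first header block
--         for block_start, block_end in reversed(header_blocks[1:]):
--             del lines[block_start:block_end]
--
--     # Clean up multiple consecutive separators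
--     result = []
--     prev_was_sep = False
--     for line in lines:
--         if line.strip() == '---':
--             if not prev_was_sep:
--                 result.append(line)
--                 prev_was_sep = True
--         else:
--             result.append(line)
--             prev_was_sep = False
--
--     # Clean up multiple blank lines
--     final = []
--     blank_count = 0
--     for line in result:
--         if line.strip() == '':
--             blank_count += 1
--             if blank_count <= 2:
--                 final.append(line)
--         else:
--             blank_count = 0
--             final.append(line)
--
--     return '\n'.join(final)
-- ===== SOURCE B (Python) =====
-- def clean_duplicate_headers(content: str) -> str:
--     """Remove duplicate headers, keeping only the first one.
--
--     Single output-building pass: after locating the title and the header-block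
--     ranges, one forward sweep emits lines, skipping the non-first header blocks
--     and collapsing separators / blank runs on the fly.
--     """
--     lines = content.split('\n')
--     n = len(lines)
--
--     # locate the title line
--     t = 0
--     while t < n and not lines[t].startswith('# '):
--         t += 1
--     if t == n:
--         return content
--
--     # collect the ranges of every header block AFTER the first one
--     pending = []
--     seen_first = False
--     i = t + 1
--     while i < n:
--         s = lines[i].strip()
--         if s.startswith('**'):
--             j = i
--             while j < n and (lines[j].strip().startswith('**') or lines[j].strip() == ''):
--                 j += 1
--             if seen_first:
--                 pending.append((i, j))
--             else:
--                 seen_first = True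
--             i = j
--         elif s.startswith('<!--') or s.startswith('##'):
--             break
--         else:
--             i += 1
--
--     # one pass: skip duplicate blocks, collapse '---' runs, cap blank runs at 2
--     out = []
--     prev_sep = False
--     blanks = 0
--     for idx, line in enumerate(lines):
--         if pending and pending[0][0] <= idx < pending[0][1]:
--             if idx + 1 == pending[0][1]:
--                 pending.pop(0)
--             continue
--         s = line.strip()
--         if s == '---':
--             if prev_sep:
--                 continue
--             prev_sep = True
--             blanks = 0
--         elif s == '':
--             prev_sep = False
--             blanks += 1
--             if blanks > 2:
--                 continue
--         else:
--             prev_sep = False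
--             blanks = 0
--         out.append(line)
--     return '\n'.join(out)
-- ===== Notes on version B (the rewrite author's own statement) =====
-- stated objective: alternative
-- what changed: Instead of deleting duplicate-block slices in reverse and then running two separate cleanup sweeps (separator collapse, then blank-run capping), B collects only the non-first header-block ranges and builds the output in a single forward pass that skips those ranges and maintains the separator/blank state simultaneously.
import Mathlib
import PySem

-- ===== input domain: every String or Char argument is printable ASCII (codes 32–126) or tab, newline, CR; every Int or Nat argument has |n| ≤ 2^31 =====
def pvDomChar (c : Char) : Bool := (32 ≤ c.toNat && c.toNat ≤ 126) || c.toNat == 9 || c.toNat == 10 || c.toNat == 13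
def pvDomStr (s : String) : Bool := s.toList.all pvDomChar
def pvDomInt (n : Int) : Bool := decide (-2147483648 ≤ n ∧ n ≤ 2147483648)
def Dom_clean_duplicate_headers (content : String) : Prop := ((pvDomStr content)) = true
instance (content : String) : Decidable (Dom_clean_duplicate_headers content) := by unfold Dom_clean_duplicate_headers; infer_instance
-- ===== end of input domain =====

-- B replaces A's reverse slice-deletions plus two separate cleanup sweeps by a single
-- forward output-building pass over the lines (equal cost; objective: alternative).

-- shared by both ports: content.split('\n')
def pvSplitNL (content : String) : List String := (PySem.Str.split? content "\n").getD []

-- ===== PORT A =====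

-- 'lines[i].strip().startswith('**') or lines[i].strip() == '''   (A's inner while test)
def pvIsHdrLine (l : String) : Bool :=
  PySem.Str.startswith (PySem.Str.strip l) "**" || PySem.Str.strip l == ""

-- A's title loop: first index whose line startswith '# ', else None
def pvFindTitle : List String → Nat → Option Nat
  | [], _ => none
  | l :: ls, i => if PySem.Str.startswith l "# " then some i else pvFindTitle ls (i + 1)

-- A's inner while: advance block_end over header/blank lines
def pvBlockEnd (lines : List String) (j : Nat) : Nat :=
  if h : j < lines.length ∧ pvIsHdrLine (lines.getD j "") then
    pvBlockEnd lines (j + 1)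
  else j
termination_by lines.length - j
decreasing_by omega

theorem pvBlockEnd_ge (lines : List String) (j : Nat) : j ≤ pvBlockEnd lines j := by
  fun_induction pvBlockEnd <;> omega

theorem pvBlockEnd_gt (lines : List String) (j : Nat) (h : j < lines.length)
    (hh : pvIsHdrLine (lines.getD j "") = true) : j < pvBlockEnd lines j := by
  have := pvBlockEnd_ge lines (j + 1)
  rw [pvBlockEnd, dif_pos ⟨h, hh⟩]
  omega

-- A's outer while: collect all header blocks after the title
def pvScanA (lines : List String) (i : Nat) (acc : List (Nat × Nat)) : List (Nat × Nat) :=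
  if h : i < lines.length then
    if PySem.Str.startswith (PySem.Str.strip (lines.getD i "")) "**" then
      pvScanA lines (pvBlockEnd lines i) (acc ++ [(i, pvBlockEnd lines i)])
    else if PySem.Str.strip (lines.getD i "") == "---" then
      pvScanA lines (i + 1) acc
    else if PySem.Str.startswith (PySem.Str.strip (lines.getD i "")) "<!--"
         || PySem.Str.startswith (PySem.Str.strip (lines.getD i "")) "##" then
      acc
    else
      pvScanA lines (i + 1) acc
  else acc
termination_by lines.length - i
decreasing_by
  · have h1 : i < pvBlockEnd lines i := by
      apply pvBlockEnd_gt lines i h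
      simp only [pvIsHdrLine, Bool.or_eq_true]
      exact Or.inl (by assumption)
    omega
  · omega
  · omega

-- 'for block_start, block_end in reversed(header_blocks[1:]): del lines[block_start:block_end]'
def pvDelBlocks (bs : List (Nat × Nat)) (ls : List String) : List String :=
  bs.reverse.foldl (fun l p => l.take p.1 ++ l.drop p.2) ls

def clean_duplicate_headers (content : String) : String :=
  let lines := pvSplitNL content
  match pvFindTitle lines 0 with
  | none => content
  | some t =>
    let blocks := pvScanA lines (t + 1) []
    let lines2 := if 1 < blocks.length then pvDelBlocks (blocks.drop 1) lines else lines
    let r1 := (lines2.foldl (fun (st : List String × Bool) line =>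
        if PySem.Str.strip line == "---" then
          if st.2 then (st.1, true) else (st.1 ++ [line], true)
        else (st.1 ++ [line], false)) ([], false)).1
    let r2 := (r1.foldl (fun (st : List String × Nat) line =>
        if PySem.Str.strip line == "" then
          if st.2 + 1 ≤ 2 then (st.1 ++ [line], st.2 + 1) else (st.1, st.2 + 1)
        else (st.1 ++ [line], 0)) ([], 0)).1
    PySem.Str.join "\n" r2

-- ===== PORT B =====

-- B's title loop: 'while t < n and not lines[t].startswith('# '): t += 1'
def pvFindTitleB (lines : List String) (t : Nat) : Nat :=
  if h : t < lines.length ∧ ¬ PySem.Str.startswith (lines.getD t "") "# " then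
    pvFindTitleB lines (t + 1)
  else t
termination_by lines.length - t
decreasing_by omega

-- B's inner while: end of the run of '**'/blank lines starting at j
def pvRunEnd (lines : List String) (j : Nat) : Nat :=
  if h : j < lines.length ∧ (PySem.Str.startswith (PySem.Str.strip (lines.getD j "")) "**"
        || PySem.Str.strip (lines.getD j "") == "") then
    pvRunEnd lines (j + 1)
  else j
termination_by lines.length - j
decreasing_by omega

theorem pvRunEnd_ge (lines : List String) (j : Nat) : j ≤ pvRunEnd lines j := by
  fun_induction pvRunEnd <;> omega

theorem pvRunEnd_gt (lines : List String) (j : Nat) (h : j < lines.length)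
    (hh : (PySem.Str.startswith (PySem.Str.strip (lines.getD j "")) "**"
        || PySem.Str.strip (lines.getD j "") == "") = true) : j < pvRunEnd lines j := by
  have := pvRunEnd_ge lines (j + 1)
  rw [pvRunEnd, dif_pos ⟨h, hh⟩]
  omega

-- B's block scan: collect the ranges of every header block AFTER the first one
def pvScanB (lines : List String) (i : Nat) (seen : Bool) (acc : List (Nat × Nat)) :
    List (Nat × Nat) :=
  if h : i < lines.length then
    if PySem.Str.startswith (PySem.Str.strip (lines.getD i "")) "**" then
      pvScanB lines (pvRunEnd lines i) true
        (if seen then acc ++ [(i, pvRunEnd lines i)] else acc)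
    else if PySem.Str.startswith (PySem.Str.strip (lines.getD i "")) "<!--"
         || PySem.Str.startswith (PySem.Str.strip (lines.getD i "")) "##" then
      acc
    else
      pvScanB lines (i + 1) seen acc
  else acc
termination_by lines.length - i
decreasing_by
  · have h1 : i < pvRunEnd lines i := by
      apply pvRunEnd_gt lines i h
      simp only [Bool.or_eq_true]
      exact Or.inl (by assumption)
    omega
  · omega

-- one emitted line: update (out, prev_sep, blanks)
def pvEmitLine (line : String) (st : List String × Bool × Nat) : List String × Bool × Nat :=
  if PySem.Str.strip line == "---" then
    if st.2.1 then st else (st.1 ++ [line], true, 0)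
  else if PySem.Str.strip line == "" then
    if st.2.2 + 1 > 2 then (st.1, false, st.2.2 + 1) else (st.1 ++ [line], false, st.2.2 + 1)
  else (st.1 ++ [line], false, 0)

-- B's single output-building pass over (idx, line) with the pending skip ranges
def pvEmit : List String → Nat → List (Nat × Nat) → List String × Bool × Nat → List String
  | [], _, _, st => st.1
  | line :: rest, idx, pending, st =>
    match pending with
    | (s, e) :: ps =>
      if s ≤ idx ∧ idx < e then
        pvEmit rest (idx + 1) (if idx + 1 = e then ps else (s, e) :: ps) st
      else
        pvEmit rest (idx + 1) ((s, e) :: ps) (pvEmitLine line st)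
    | [] => pvEmit rest (idx + 1) [] (pvEmitLine line st)

def clean_duplicate_headers_alt (content : String) : String :=
  let lines := pvSplitNL content
  let t := pvFindTitleB lines 0
  if t = lines.length then content
  else
    PySem.Str.join "\n" (pvEmit lines 0 (pvScanB lines (t + 1) false []) ([], false, 0))

-- ===== PRECONDITION & SPEC =====
def Spec_clean_duplicate_headers (content : String) (out : String) : Prop := out = clean_duplicate_headers_alt content
instance (content : String) (out : String) : Decidable (Spec_clean_duplicate_headers content out) := by unfold Spec_clean_duplicate_headers; infer_instance

-- ===== CLAIM (what is proved, stated in full; the proofs are below) =====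
def Claim_equal_clean_duplicate_headers : Prop := ∀ (content : String), Dom_clean_duplicate_headers content → Spec_clean_duplicate_headers content (clean_duplicate_headers content)

-- ===== LEMMAS AND PROOFS =====

-- ---- title search ----
def pvTAux : List String → Nat
  | [] => 0
  | l :: ls => if PySem.Str.startswith l "# " then 0 else pvTAux ls + 1

theorem pvTAux_le (ls : List String) : pvTAux ls ≤ ls.length := by
  induction ls with
  | nil => simp [pvTAux]
  | cons l ls ih => simp only [pvTAux]; split <;> simp <;> omega

theorem findTitleA_eq (ls : List String) : ∀ i, pvFindTitle ls i =
    if pvTAux ls < ls.length then some (i + pvTAux ls) else none := by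
  induction ls with
  | nil => intro i; simp [pvFindTitle, pvTAux]
  | cons l ls ih =>
    intro i
    have hle := pvTAux_le ls
    by_cases h : PySem.Str.startswith l "# " = true
    · simp only [pvFindTitle, pvTAux, List.length_cons, if_pos h]
      rw [if_pos (by omega : 0 < ls.length + 1)]
      simp
    · simp only [pvFindTitle, pvTAux, List.length_cons, if_neg h]
      rw [ih (i + 1)]
      split_ifs with h2 h3 <;> first | (congr 1; omega) | omega | rfl

theorem findTitleB_eq (lines : List String) :
    ∀ n k, lines.length - k ≤ n → k ≤ lines.length →
      pvFindTitleB lines k = k + pvTAux (lines.drop k) := by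
  intro n
  induction n with
  | zero =>
    intro k h1 h2
    have hk : k = lines.length := by omega
    subst hk
    rw [pvFindTitleB, dif_neg (fun hc => by omega)]
    simp [List.drop_length, pvTAux]
  | succ n ih =>
    intro k h1 h2
    by_cases hk : k < lines.length
    · have hdrop : lines.drop k = lines[k] :: lines.drop (k + 1) := List.drop_eq_getElem_cons hk
      have hgd : lines.getD k "" = lines[k] := by
        rw [List.getD_eq_getElem?_getD, List.getElem?_eq_getElem hk]; rfl
      by_cases hs : PySem.Str.startswith lines[k] "# " = true
      · rw [pvFindTitleB, dif_neg (fun hc => hc.2 (hgd ▸ hs))]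
        rw [hdrop]
        simp only [pvTAux, if_pos hs]
        omega
      · rw [pvFindTitleB, dif_pos ⟨hk, by rw [hgd]; exact hs⟩,
            ih (k + 1) (by omega) (by omega)]
        rw [hdrop]
        simp only [pvTAux, if_neg hs]
        omega
    · have hke : k = lines.length := by omega
      subst hke
      rw [pvFindTitleB, dif_neg (fun hc => by omega)]
      simp [List.drop_length, pvTAux]

-- ---- scans agree ----
theorem runEnd_eq_blockEnd (lines : List String) (j : Nat) :
    pvRunEnd lines j = pvBlockEnd lines j := by
  fun_induction pvRunEnd lines j with
  | case1 j h ih =>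
    conv_rhs => rw [pvBlockEnd, dif_pos (⟨h.1, h.2⟩ :
      j < lines.length ∧ pvIsHdrLine (lines.getD j "") = true)]
    exact ih
  | case2 j h =>
    conv_rhs => rw [pvBlockEnd, dif_neg (fun hc => h ⟨hc.1, hc.2⟩)]

theorem scanA_acc (lines : List String) :
    ∀ n i acc, lines.length - i ≤ n → pvScanA lines i acc = acc ++ pvScanA lines i [] := by
  intro n
  induction n with
  | zero =>
    intro i acc h
    have hns : ¬ i < lines.length := by omega
    conv_lhs => rw [pvScanA]
    conv_rhs => rw [pvScanA]
    simp [dif_neg hns]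
  | succ n ih =>
    intro i acc h
    by_cases hi : i < lines.length
    · by_cases h1 : PySem.Str.startswith (PySem.Str.strip (lines.getD i "")) "**" = true
      · have he : i < pvBlockEnd lines i := pvBlockEnd_gt lines i hi
          (by simp only [pvIsHdrLine, Bool.or_eq_true]; exact Or.inl h1)
        conv_lhs => rw [pvScanA]
        conv_rhs => rw [pvScanA]
        simp only [dif_pos hi, if_pos h1, List.nil_append]
        rw [ih (pvBlockEnd lines i) (acc ++ [(i, pvBlockEnd lines i)]) (by omega),
            ih (pvBlockEnd lines i) [(i, pvBlockEnd lines i)] (by omega)]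
        simp
      · by_cases h2 : (PySem.Str.strip (lines.getD i "") == "---") = true
        · conv_lhs => rw [pvScanA]
          conv_rhs => rw [pvScanA]
          simp only [dif_pos hi, if_neg h1, if_pos h2]
          exact ih (i + 1) acc (by omega)
        · by_cases h3 : (PySem.Str.startswith (PySem.Str.strip (lines.getD i "")) "<!--"
              || PySem.Str.startswith (PySem.Str.strip (lines.getD i "")) "##") = true
          · conv_lhs => rw [pvScanA]
            conv_rhs => rw [pvScanA]
            simp only [dif_pos hi, if_neg h1, if_neg h2, if_pos h3]
            simp
          · conv_lhs => rw [pvScanA]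
            conv_rhs => rw [pvScanA]
            simp only [dif_pos hi, if_neg h1, if_neg h2, if_neg h3]
            exact ih (i + 1) acc (by omega)
    · conv_lhs => rw [pvScanA]
      conv_rhs => rw [pvScanA]
      simp [dif_neg hi]

theorem scanB_true (lines : List String) :
    ∀ n i acc, lines.length - i ≤ n → pvScanB lines i true acc = pvScanA lines i acc := by
  intro n
  induction n with
  | zero =>
    intro i acc h
    have hns : ¬ i < lines.length := by omega
    rw [pvScanB, dif_neg hns]
    rw [pvScanA, dif_neg hns]
  | succ n ih =>
    intro i acc h
    by_cases hi : i < lines.length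
    · by_cases h1 : PySem.Str.startswith (PySem.Str.strip (lines.getD i "")) "**" = true
      · have he : i < pvBlockEnd lines i := pvBlockEnd_gt lines i hi
          (by simp only [pvIsHdrLine, Bool.or_eq_true]; exact Or.inl h1)
        conv_lhs => rw [pvScanB]
        conv_rhs => rw [pvScanA]
        simp only [dif_pos hi, if_pos h1, if_pos rfl, runEnd_eq_blockEnd]
        exact ih (pvBlockEnd lines i) _ (by omega)
      · by_cases h2 : (PySem.Str.strip (lines.getD i "") == "---") = true
        · have hstr : PySem.Str.strip (lines.getD i "") = "---" := by simpa using h2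
          have h3 : (PySem.Str.startswith (PySem.Str.strip (lines.getD i "")) "<!--"
              || PySem.Str.startswith (PySem.Str.strip (lines.getD i "")) "##") = false := by
            rw [hstr]; decide
          conv_lhs => rw [pvScanB]
          conv_rhs => rw [pvScanA]
          simp only [dif_pos hi, if_neg h1, if_pos h2,
            if_neg (by simp only [h3]; simp : ¬ ((PySem.Str.startswith (PySem.Str.strip (lines.getD i "")) "<!--"
              || PySem.Str.startswith (PySem.Str.strip (lines.getD i "")) "##") = true))]
          exact ih (i + 1) acc (by omega)
        · by_cases h3 : (PySem.Str.startswith (PySem.Str.strip (lines.getD i "")) "<!--"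
              || PySem.Str.startswith (PySem.Str.strip (lines.getD i "")) "##") = true
          · conv_lhs => rw [pvScanB]
            conv_rhs => rw [pvScanA]
            simp only [dif_pos hi, if_neg h1, if_neg h2, if_pos h3]
          · conv_lhs => rw [pvScanB]
            conv_rhs => rw [pvScanA]
            simp only [dif_pos hi, if_neg h1, if_neg h2, if_neg h3]
            exact ih (i + 1) acc (by omega)
    · rw [pvScanB, dif_neg hi]
      rw [pvScanA, dif_neg hi]

theorem scanB_false (lines : List String) :
    ∀ n i acc, lines.length - i ≤ n →
      pvScanB lines i false acc = acc ++ (pvScanA lines i []).tail := by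
  intro n
  induction n with
  | zero =>
    intro i acc h
    have hns : ¬ i < lines.length := by omega
    rw [pvScanB, dif_neg hns]
    rw [pvScanA, dif_neg hns]
    simp
  | succ n ih =>
    intro i acc h
    by_cases hi : i < lines.length
    · by_cases h1 : PySem.Str.startswith (PySem.Str.strip (lines.getD i "")) "**" = true
      · have he : i < pvBlockEnd lines i := pvBlockEnd_gt lines i hi
          (by simp only [pvIsHdrLine, Bool.or_eq_true]; exact Or.inl h1)
        conv_lhs => rw [pvScanB]
        conv_rhs => rw [pvScanA]
        simp only [dif_pos hi, if_pos h1, Bool.false_eq_true, if_false, List.nil_append,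
          runEnd_eq_blockEnd]
        rw [scanB_true lines lines.length _ _ (by omega)]
        rw [scanA_acc lines lines.length (pvBlockEnd lines i) [(i, pvBlockEnd lines i)] (by omega)]
        rw [scanA_acc lines lines.length (pvBlockEnd lines i) acc (by omega)]
        simp
      · by_cases h2 : (PySem.Str.strip (lines.getD i "") == "---") = true
        · have hstr : PySem.Str.strip (lines.getD i "") = "---" := by simpa using h2
          have h3 : (PySem.Str.startswith (PySem.Str.strip (lines.getD i "")) "<!--"
              || PySem.Str.startswith (PySem.Str.strip (lines.getD i "")) "##") = false := by
            rw [hstr]; decide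
          conv_lhs => rw [pvScanB]
          conv_rhs => rw [pvScanA]
          simp only [dif_pos hi, if_neg h1, if_pos h2,
            if_neg (by simp only [h3]; simp : ¬ ((PySem.Str.startswith (PySem.Str.strip (lines.getD i "")) "<!--"
              || PySem.Str.startswith (PySem.Str.strip (lines.getD i "")) "##") = true))]
          exact ih (i + 1) acc (by omega)
        · by_cases h3 : (PySem.Str.startswith (PySem.Str.strip (lines.getD i "")) "<!--"
              || PySem.Str.startswith (PySem.Str.strip (lines.getD i "")) "##") = true
          · conv_lhs => rw [pvScanB]
            conv_rhs => rw [pvScanA]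
            simp only [dif_pos hi, if_neg h1, if_neg h2, if_pos h3]
            simp
          · conv_lhs => rw [pvScanB]
            conv_rhs => rw [pvScanA]
            simp only [dif_pos hi, if_neg h1, if_neg h2, if_neg h3]
            exact ih (i + 1) acc (by omega)
    · rw [pvScanB, dif_neg hi]
      conv_rhs => rw [pvScanA, dif_neg hi]
      simp

-- ---- block-range invariant ----
def pvChain (n : Nat) : Nat → List (Nat × Nat) → Prop
  | _, [] => True
  | m, (s, e) :: bs => m ≤ s ∧ s < e ∧ e ≤ n ∧ pvChain n e bs

theorem chain_mono {n m m' : Nat} {bs : List (Nat × Nat)} (h : m' ≤ m)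
    (hc : pvChain n m bs) : pvChain n m' bs := by
  cases bs with
  | nil => trivial
  | cons b bs => obtain ⟨h1, h2⟩ := hc; exact ⟨by omega, h2⟩

theorem chain_forall {n : Nat} : ∀ {m : Nat} {bs : List (Nat × Nat)}, pvChain n m bs →
    ∀ p ∈ bs, m ≤ p.1 ∧ p.1 < p.2 ∧ p.2 ≤ n := by
  intro m bs
  induction bs generalizing m with
  | nil => intro _ p hp; cases hp
  | cons b bs ih =>
    obtain ⟨s, e⟩ := b
    intro hc p hp
    obtain ⟨h1, h2, h3, h4⟩ := hc
    rcases List.mem_cons.mp hp with rfl | hp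
    · exact ⟨h1, h2, h3⟩
    · have := ih h4 p hp
      exact ⟨by omega, this.2⟩

theorem chain_shift {n d : Nat} : ∀ {m : Nat} {bs : List (Nat × Nat)}, d ≤ m → pvChain n m bs →
    pvChain (n - d) (m - d) (bs.map (fun p => (p.1 - d, p.2 - d))) := by
  intro m bs
  induction bs generalizing m with
  | nil => intro _ _; trivial
  | cons b bs ih =>
    obtain ⟨s, e⟩ := b
    intro hd hc
    obtain ⟨h1, h2, h3, h4⟩ := hc
    exact ⟨by omega, by omega, by omega, ih (by omega) h4⟩

theorem blockEnd_le (lines : List String) : ∀ j, j ≤ lines.length →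
    pvBlockEnd lines j ≤ lines.length := by
  intro j
  fun_induction pvBlockEnd lines j with
  | case1 j h ih => intro _; exact ih (by omega)
  | case2 j h => intro hj; exact hj

theorem scanA_chain (lines : List String) :
    ∀ n i, lines.length - i ≤ n → pvChain lines.length i (pvScanA lines i []) := by
  intro n
  induction n with
  | zero =>
    intro i h
    rw [pvScanA, dif_neg (by omega : ¬ i < lines.length)]
    trivial
  | succ n ih =>
    intro i h
    by_cases hi : i < lines.length
    · by_cases h1 : PySem.Str.startswith (PySem.Str.strip (lines.getD i "")) "**" = true
      · have he : i < pvBlockEnd lines i := pvBlockEnd_gt lines i hi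
          (by simp only [pvIsHdrLine, Bool.or_eq_true]; exact Or.inl h1)
        have hle : pvBlockEnd lines i ≤ lines.length := blockEnd_le lines i (by omega)
        rw [pvScanA]
        simp only [dif_pos hi, if_pos h1, List.nil_append]
        rw [scanA_acc lines lines.length (pvBlockEnd lines i) [(i, pvBlockEnd lines i)] (by omega)]
        exact ⟨le_refl i, he, hle, ih (pvBlockEnd lines i) (by omega)⟩
      · by_cases h2 : (PySem.Str.strip (lines.getD i "") == "---") = true
        · rw [pvScanA]
          simp only [dif_pos hi, if_neg h1, if_pos h2]
          exact chain_mono (by omega) (ih (i + 1) (by omega))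
        · by_cases h3 : (PySem.Str.startswith (PySem.Str.strip (lines.getD i "")) "<!--"
              || PySem.Str.startswith (PySem.Str.strip (lines.getD i "")) "##") = true
          · rw [pvScanA]
            simp only [dif_pos hi, if_neg h1, if_neg h2, if_pos h3]
            trivial
          · rw [pvScanA]
            simp only [dif_pos hi, if_neg h1, if_neg h2, if_neg h3]
            exact chain_mono (by omega) (ih (i + 1) (by omega))
    · rw [pvScanA, dif_neg hi]
      trivial

-- ---- deletion = index-driven skipping ----
def pvKeep : List (Nat × Nat) → Nat → List String → List String
  | _, _, [] => []
  | [], i, x :: xs => x :: pvKeep [] (i + 1) xs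
  | (s, e) :: ps, i, x :: xs =>
    if s ≤ i ∧ i < e then pvKeep (if i + 1 = e then ps else (s, e) :: ps) (i + 1) xs
    else x :: pvKeep ((s, e) :: ps) (i + 1) xs

theorem keep_nil (ls : List String) : ∀ i, pvKeep [] i ls = ls := by
  induction ls with
  | nil => intro i; rfl
  | cons x xs ih => intro i; simp [pvKeep, ih]

theorem keep_skip (s e : Nat) (ps : List (Nat × Nat)) : ∀ (ls : List String) (i : Nat),
    s ≤ i → i < e → e ≤ i + ls.length →
    pvKeep ((s, e) :: ps) i ls = pvKeep ps e (ls.drop (e - i)) := by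
  intro ls
  induction ls with
  | nil => intro i h1 h2 h3; simp at h3; omega
  | cons x xs ih =>
    intro i h1 h2 h3
    simp only [pvKeep, if_pos (⟨h1, h2⟩ : s ≤ i ∧ i < e)]
    by_cases hpop : i + 1 = e
    · rw [if_pos hpop]
      have h4 : e - i = 1 := by omega
      rw [h4, hpop]
      rfl
    · rw [if_neg hpop, ih (i + 1) (by omega) (by omega) (by simp at h3 ⊢; omega)]
      have h4 : e - i = (e - (i + 1)) + 1 := by omega
      rw [h4, List.drop_succ_cons]

theorem keep_run (s e : Nat) (ps : List (Nat × Nat)) : ∀ (ls : List String) (i : Nat),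
    i ≤ s → pvKeep ((s, e) :: ps) i ls = ls.take (s - i) ++ pvKeep ((s, e) :: ps) s (ls.drop (s - i)) := by
  intro ls
  induction ls with
  | nil => intro i h1; simp [pvKeep]
  | cons x xs ih =>
    intro i h1
    by_cases hi : i = s
    · subst hi; simp
    · simp only [pvKeep, if_neg (by omega : ¬(s ≤ i ∧ i < e))]
      rw [ih (i + 1) (by omega)]
      have h4 : s - i = (s - (i + 1)) + 1 := by omega
      rw [h4, List.drop_succ_cons, List.take_succ_cons, List.cons_append]

theorem keep_shift (d : Nat) : ∀ (ls : List String) (ps : List (Nat × Nat)) (i : Nat),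
    (∀ p ∈ ps, d ≤ p.1 ∧ p.1 ≤ p.2) → d ≤ i →
    pvKeep (ps.map (fun p => (p.1 - d, p.2 - d))) (i - d) ls = pvKeep ps i ls := by
  intro ls
  induction ls with
  | nil => intro ps i _ _; cases ps <;> rfl
  | cons x xs ih =>
    intro ps i hps hdi
    cases ps with
    | nil => simp only [List.map_nil, pvKeep]; rw [keep_nil, keep_nil]
    | cons p ps' =>
      obtain ⟨s, e⟩ := p
      have h1 := hps (s, e) (List.mem_cons_self ..)
      simp only [List.map_cons, pvKeep]
      by_cases hin : s ≤ i ∧ i < e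
      · rw [if_pos (by omega : s - d ≤ i - d ∧ i - d < e - d), if_pos hin]
        by_cases hpop : i + 1 = e
        · rw [if_pos (by omega : i - d + 1 = e - d), if_pos hpop]
          have h2 : i - d + 1 = i + 1 - d := by omega
          rw [h2]
          exact ih ps' (i + 1) (fun p hp => hps p (List.mem_cons_of_mem _ hp)) (by omega)
        · rw [if_neg (by omega : ¬(i - d + 1 = e - d)), if_neg hpop]
          have h2 : i - d + 1 = i + 1 - d := by omega
          rw [h2]
          simpa only [List.map_cons] using ih ((s, e) :: ps') (i + 1) hps (by omega)
      · rw [if_neg (by omega : ¬(s - d ≤ i - d ∧ i - d < e - d)), if_neg hin]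
        have h2 : i - d + 1 = i + 1 - d := by omega
        rw [h2]
        congr 1
        simpa only [List.map_cons] using ih ((s, e) :: ps') (i + 1) hps (by omega)

theorem del_nil (ls : List String) : pvDelBlocks [] ls = ls := rfl

theorem del_cons (s e : Nat) (ps : List (Nat × Nat)) (ls : List String) :
    pvDelBlocks ((s, e) :: ps) ls
      = (pvDelBlocks ps ls).take s ++ (pvDelBlocks ps ls).drop e := by
  simp [pvDelBlocks, List.foldl_append]

theorem del_take (m : Nat) : ∀ (ps : List (Nat × Nat)) (ls : List String),
    (∀ p ∈ ps, m ≤ p.1 ∧ p.1 ≤ p.2) → (pvDelBlocks ps ls).take m = ls.take m := by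
  intro ps
  induction ps with
  | nil => intro ls _; rfl
  | cons p qs ih =>
    obtain ⟨s, e⟩ := p
    intro ls hp
    have h1 := hp (s, e) (List.mem_cons_self ..)
    have htail : ∀ p ∈ qs, m ≤ p.1 ∧ p.1 ≤ p.2 := fun p hq => hp p (List.mem_cons_of_mem _ hq)
    rw [del_cons]
    set X := pvDelBlocks qs ls with hX
    rw [List.take_append, List.take_take,
        (by omega : min m s = m)]
    by_cases hc : m ≤ (X.take s).length
    · rw [(by omega : m - (X.take s).length = 0)]
      simp only [List.take_zero, List.append_nil]
      rw [hX]
      exact ih ls htail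
    · have hxl : X.length < m := by
        simp only [List.length_take] at hc; omega
      rw [List.take_of_length_le (by omega : X.length ≤ m),
          List.take_of_length_le (by omega : X.length ≤ s),
          List.drop_eq_nil_of_le (by omega : X.length ≤ e)]
      have := ih ls htail
      rw [List.take_of_length_le (by omega : X.length ≤ m)] at this
      simp [this]

theorem del_drop_shift (d : Nat) : ∀ (ps : List (Nat × Nat)) (ls : List String),
    (∀ p ∈ ps, d ≤ p.1 ∧ p.1 ≤ p.2) →
    (pvDelBlocks ps ls).drop d = pvDelBlocks (ps.map (fun p => (p.1 - d, p.2 - d))) (ls.drop d) := by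
  intro ps
  induction ps with
  | nil => intro ls _; rfl
  | cons p qs ih =>
    obtain ⟨s, e⟩ := p
    intro ls hp
    have h1 := hp (s, e) (List.mem_cons_self ..)
    have htail : ∀ p ∈ qs, d ≤ p.1 ∧ p.1 ≤ p.2 := fun p hq => hp p (List.mem_cons_of_mem _ hq)
    rw [del_cons, List.map_cons, del_cons, ← ih ls htail]
    set X := pvDelBlocks qs ls with hX
    rw [List.drop_append]
    by_cases hxl : X.length ≤ d
    · rw [List.drop_eq_nil_of_le (by simp [List.length_take]; omega : (X.take s).length ≤ d),
          List.drop_eq_nil_of_le (by omega : X.length ≤ e),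
          List.drop_eq_nil_of_le (by omega : X.length ≤ d)]
      simp
    · have hds : d ≤ (X.take s).length := by simp [List.length_take]; omega
      rw [(by omega : d - (X.take s).length = 0), List.drop_zero,
          List.drop_take]
      congr 1
      rw [List.drop_drop, (by omega : d + (e - d) = e)]
    

theorem del_eq_keep : ∀ (n : Nat) (bs : List (Nat × Nat)) (ls : List String), bs.length ≤ n →
    pvChain ls.length 0 bs → pvDelBlocks bs ls = pvKeep bs 0 ls := by
  intro n
  induction n with
  | zero =>
    intro bs ls h _
    have hbs : bs = [] := List.length_eq_zero_iff.mp (by omega)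
    subst hbs
    rw [del_nil, keep_nil]
  | succ n ih =>
    intro bs ls hlen hc
    cases bs with
    | nil => rw [del_nil, keep_nil]
    | cons p ps =>
      obtain ⟨s, e⟩ := p
      obtain ⟨h0s, hse, hel, hch⟩ := hc
      have hfor := chain_forall hch
      have hps : ∀ p ∈ ps, e ≤ p.1 ∧ p.1 ≤ p.2 := fun p hp => by
        have := hfor p hp; exact ⟨this.1, by omega⟩
      have hpss : ∀ p ∈ ps, s ≤ p.1 ∧ p.1 ≤ p.2 := fun p hp => by
        have := hfor p hp; exact ⟨by omega, by omega⟩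
      rw [del_cons, del_take s ps ls hpss, del_drop_shift e ps ls hps]
      rw [keep_run s e ps ls 0 (by omega)]
      simp only [Nat.sub_zero]
      rw [keep_skip s e ps (ls.drop s) s (le_refl s) hse
        (by simp [List.length_drop]; omega)]
      rw [List.drop_drop, (by omega : s + (e - s) = e)]
      rw [← keep_shift e (ls.drop e) ps e hps (le_refl e)]
      rw [Nat.sub_self]
      congr 1
      have hlen' : ps.length ≤ n := by simp only [List.length_cons] at hlen; omega
      apply ih _ _ (by simpa using hlen')
      have := chain_shift (n := ls.length) (d := e) (le_refl e) hch
      rw [Nat.sub_self] at this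
      simpa [List.length_drop] using this

-- ---- A's two cleanup sweeps, recursively ----
def pvPass1 : List String → Bool → List String
  | [], _ => []
  | l :: ls, prev =>
    if PySem.Str.strip l == "---" then
      if prev then pvPass1 ls true else l :: pvPass1 ls true
    else l :: pvPass1 ls false

def pvPass2 : List String → Nat → List String
  | [], _ => []
  | l :: ls, b =>
    if PySem.Str.strip l == "" then
      if b + 1 ≤ 2 then l :: pvPass2 ls (b + 1) else pvPass2 ls (b + 1)
    else l :: pvPass2 ls 0

theorem fold1_eq : ∀ (ls : List String) (acc : List String) (prev : Bool),
    (ls.foldl (fun (st : List String × Bool) line =>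
        if PySem.Str.strip line == "---" then
          if st.2 then (st.1, true) else (st.1 ++ [line], true)
        else (st.1 ++ [line], false)) (acc, prev)).1 = acc ++ pvPass1 ls prev := by
  intro ls
  induction ls with
  | nil => intro acc prev; simp [pvPass1]
  | cons l ls ih =>
    intro acc prev
    simp only [List.foldl_cons, pvPass1]
    by_cases h : (PySem.Str.strip l == "---") = true
    · rw [if_pos h, if_pos h]
      cases prev with
      | true => simpa using ih acc true
      | false => simpa using ih (acc ++ [l]) true
    · rw [if_neg h, if_neg h]
      simpa using ih (acc ++ [l]) false

theorem fold2_eq : ∀ (ls : List String) (acc : List String) (b : Nat),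
    (ls.foldl (fun (st : List String × Nat) line =>
        if PySem.Str.strip line == "" then
          if st.2 + 1 ≤ 2 then (st.1 ++ [line], st.2 + 1) else (st.1, st.2 + 1)
        else (st.1 ++ [line], 0)) (acc, b)).1 = acc ++ pvPass2 ls b := by
  intro ls
  induction ls with
  | nil => intro acc b; simp [pvPass2]
  | cons l ls ih =>
    intro acc b
    simp only [List.foldl_cons, pvPass2]
    by_cases h : (PySem.Str.strip l == "") = true
    · rw [if_pos h, if_pos h]
      by_cases hb : b + 1 ≤ 2
      · rw [if_pos hb, if_pos hb]
        simpa using ih (acc ++ [l]) (b + 1)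
      · rw [if_neg hb, if_neg hb]
        simpa using ih acc (b + 1)
    · rw [if_neg h, if_neg h]
      simpa using ih (acc ++ [l]) 0

-- ---- B's fused pass = skip, then the two sweeps ----
theorem emitLine_correct (K : List String) (out : List String) (prev : Bool) (b : Nat)
    (x : String) :
    (pvEmitLine x (out, prev, b)).1
        ++ pvPass2 (pvPass1 K (pvEmitLine x (out, prev, b)).2.1) (pvEmitLine x (out, prev, b)).2.2
      = out ++ pvPass2 (pvPass1 (x :: K) prev) b := by
  by_cases h1 : (PySem.Str.strip x == "---") = true
  · have hx : PySem.Str.strip x = "---" := by simpa using h1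
    have h2 : (PySem.Str.strip x == "") = false := by rw [hx]; decide
    cases prev with
    | true =>
      have e1 : pvEmitLine x (out, true, b) = (out, true, b) := by
        rw [pvEmitLine, if_pos h1]; rfl
      rw [e1]
      simp [pvPass1, h1]
    | false =>
      have e1 : pvEmitLine x (out, false, b) = (out ++ [x], true, 0) := by
        rw [pvEmitLine, if_pos h1]; rfl
      rw [e1]
      simp [pvPass1, pvPass2, h1, h2]
  · by_cases h2 : (PySem.Str.strip x == "") = true
    · by_cases hb : b + 1 ≤ 2
      · have e1 : pvEmitLine x (out, prev, b) = (out ++ [x], false, b + 1) := by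
          rw [pvEmitLine, if_neg h1, if_pos h2, if_neg (by show ¬ (b + 1 > 2); omega)]
        rw [e1]
        simp [pvPass1, pvPass2, h1, h2, hb]
      · have e1 : pvEmitLine x (out, prev, b) = (out, false, b + 1) := by
          rw [pvEmitLine, if_neg h1, if_pos h2, if_pos (by show b + 1 > 2; omega)]
        rw [e1]
        simp [pvPass1, pvPass2, h1, h2, hb]
    · have e1 : pvEmitLine x (out, prev, b) = (out ++ [x], false, 0) := by
        rw [pvEmitLine, if_neg h1, if_neg h2]
      rw [e1]
      simp [pvPass1, pvPass2, h1, h2]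

theorem emit_eq : ∀ (ls : List String) (i : Nat) (bs : List (Nat × Nat))
    (out : List String) (prev : Bool) (b : Nat),
    pvEmit ls i bs (out, prev, b) = out ++ pvPass2 (pvPass1 (pvKeep bs i ls) prev) b := by
  intro ls
  induction ls with
  | nil => intro i bs out prev b; cases bs <;> simp [pvEmit, pvKeep, pvPass1, pvPass2]
  | cons x xs ih =>
    intro i bs out prev b
    cases bs with
    | nil =>
      simp only [pvEmit, pvKeep]
      have hst : pvEmitLine x (out, prev, b)
          = ((pvEmitLine x (out, prev, b)).1,
             (pvEmitLine x (out, prev, b)).2.1, (pvEmitLine x (out, prev, b)).2.2) := by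
        simp
      rw [hst, ih (i + 1) [] _ _ _]
      exact emitLine_correct (pvKeep [] (i + 1) xs) out prev b x
    | cons p ps =>
      obtain ⟨s, e⟩ := p
      by_cases hin : s ≤ i ∧ i < e
      · simp only [pvEmit, pvKeep]
        rw [if_pos hin, if_pos hin]
        exact ih (i + 1) _ out prev b
      · simp only [pvEmit, pvKeep]
        rw [if_neg hin, if_neg hin]
        have hst : pvEmitLine x (out, prev, b)
            = ((pvEmitLine x (out, prev, b)).1,
               (pvEmitLine x (out, prev, b)).2.1, (pvEmitLine x (out, prev, b)).2.2) := by
          simp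
        rw [hst, ih (i + 1) ((s, e) :: ps) _ _ _]
        exact emitLine_correct (pvKeep ((s, e) :: ps) (i + 1) xs) out prev b x

-- ===== VERDICT (by name: the statement is the Claim_ definition above) =====
theorem guard_del (bs : List (Nat × Nat)) (ls : List String) :
    (if 1 < bs.length then pvDelBlocks (bs.drop 1) ls else ls) = pvDelBlocks bs.tail ls := by
  rw [← List.drop_one]
  by_cases hg : 1 < bs.length
  · rw [if_pos hg]
  · rw [if_neg hg]
    match bs with
    | [] => rfl
    | [a] => rfl
    | a :: b :: l => simp at hg

theorem clean_duplicate_headers_spec : Claim_equal_clean_duplicate_headers := by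
  unfold Claim_equal_clean_duplicate_headers Spec_clean_duplicate_headers
  intro content _
  simp only [clean_duplicate_headers, clean_duplicate_headers_alt]
  set lines := pvSplitNL content with hlines
  have htB : pvFindTitleB lines 0 = pvTAux lines := by
    simpa using findTitleB_eq lines lines.length 0 (by omega) (by omega)
  have htle := pvTAux_le lines
  rw [findTitleA_eq lines 0, htB]
  by_cases ht : pvTAux lines < lines.length
  · rw [if_pos ht, if_neg (by omega : ¬ pvTAux lines = lines.length)]
    simp only [Nat.zero_add]
    set t := pvTAux lines with hT
    set blocks := pvScanA lines (t + 1) [] with hblocks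
    clear_value blocks
    have hsb : pvScanB lines (t + 1) false [] = blocks.tail := by
      rw [hblocks]
      simpa using scanB_false lines lines.length (t + 1) [] (by omega)
    have hchain : pvChain lines.length 0 blocks.tail := by
      have h1 := scanA_chain lines lines.length (t + 1) (by omega)
      rw [← hblocks] at h1
      cases blocks with
      | nil => trivial
      | cons p bs =>
        obtain ⟨s, e⟩ := p
        obtain ⟨_, _, _, h4⟩ := h1
        exact chain_mono (Nat.zero_le _) h4
    rw [guard_del, fold1_eq, fold2_eq, hsb,
        del_eq_keep blocks.tail.length blocks.tail lines (le_refl _) hchain,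
        emit_eq]
    simp
  · rw [if_neg ht, if_pos (by omega : pvTAux lines = lines.length)]
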